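-- pv_equiv track=rewrite | github.com/Adrixop95/Obliczenia_rownolegle | zad2/Laura_python/zad2_Dymarczyk.py | tworz_plansze
-- ===== SOURCE A (Python) =====
-- def tworz_plansze(n):
--     ret = []
--     for i in range(n):
--         wiersz = []
--         for j in range(n):
--             if i == j or i == n - 1 - j:
--                 wiersz.append(1)
--             else:
--                 wiersz.append(0)
--         ret.append(wiersz)
--     return ret
-- ===== SOURCE B (Python) =====
-- def tworz_plansze(n):
--     ret = [[0] * n for _ in range(n)]
--     for i in range(n):
--         ret[i][i] = 1
--         ret[i][n - 1 - i] = 1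
--     return ret
-- ===== Notes on version B (the rewrite author's own statement) =====
-- stated objective: simpler
-- what changed: B replaces A's per-cell diagonal test inside nested append loops by allocating an all-zero matrix and then marking only the 2n diagonal cells in one sparse pass.
import Mathlib
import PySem

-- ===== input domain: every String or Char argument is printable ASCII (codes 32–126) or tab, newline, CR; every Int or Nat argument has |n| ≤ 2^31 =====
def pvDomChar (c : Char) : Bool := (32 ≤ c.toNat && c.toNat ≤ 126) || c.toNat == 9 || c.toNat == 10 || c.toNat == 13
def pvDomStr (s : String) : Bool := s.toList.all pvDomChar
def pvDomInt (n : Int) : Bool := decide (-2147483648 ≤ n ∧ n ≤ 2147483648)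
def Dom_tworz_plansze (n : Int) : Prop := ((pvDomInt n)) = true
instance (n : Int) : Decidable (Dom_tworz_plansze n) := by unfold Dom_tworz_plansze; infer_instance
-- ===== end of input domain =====

-- B builds an all-zero matrix once and marks only the diagonal cells; simpler decomposition, same result.

-- ===== PORT A =====
def tworz_plansze (n : Int) : List (List Int) :=
  (PySem.List.pyRange 0 n 1).foldl
    (fun ret i =>
      ret ++ [ (PySem.List.pyRange 0 n 1).foldl
        (fun wiersz j => wiersz ++ [if i = j ∨ i = n - 1 - j then (1 : Int) else 0]) [] ])
    []

-- ===== PORT B =====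
def tworz_plansze_alt (n : Int) : List (List Int) :=
  let ret0 := (PySem.List.pyRange 0 n 1).map (fun _ => PySem.List.pyRepeat [(0 : Int)] n)
  (PySem.List.pyRange 0 n 1).foldl
    (fun ret i =>
      let row := PySem.List.pyGetD ret i []
      let row := PySem.List.pySetD row i 1
      let row := PySem.List.pySetD row (n - 1 - i) 1
      PySem.List.pySetD ret i row)
    ret0

-- ===== PRECONDITION & SPEC =====
def Spec_tworz_plansze (n : Int) (out : List (List Int)) : Prop := out = tworz_plansze_alt n
instance (n : Int) (out : List (List Int)) : Decidable (Spec_tworz_plansze n out) := by unfold Spec_tworz_plansze; infer_instance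

-- ===== CLAIM (what is proved, stated in full; the proofs are below) =====
def Claim_equal_tworz_plansze : Prop := ∀ (n : Int), Dom_tworz_plansze n → Spec_tworz_plansze n (tworz_plansze n)

-- ===== LEMMAS AND PROOFS =====

theorem pv_foldl_append {α β : Type} (g : β → α) :
    ∀ (l : List β) (acc : List α), l.foldl (fun r i => r ++ [g i]) acc = acc ++ l.map g := by
  intro l
  induction l with
  | nil => simp
  | cons x xs ih => intro acc; simp [List.foldl, ih]

-- A's row i, as a map
theorem pv_rowA (n i : Int) :
    (PySem.List.pyRange 0 n 1).foldl
      (fun wiersz j => wiersz ++ [if i = j ∨ i = n - 1 - j then (1 : Int) else 0]) []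
    = (PySem.List.pyRange 0 n 1).map (fun j => if i = j ∨ i = n - 1 - j then (1 : Int) else 0) := by
  simpa using pv_foldl_append (fun j => if i = j ∨ i = n - 1 - j then (1 : Int) else 0)
    (PySem.List.pyRange 0 n 1) []

-- B's row i after marking
def pvRowB (n : Int) (k : Nat) : List Int :=
  ((List.replicate n.toNat (0 : Int)).set k 1).set (n - 1 - (k : Int)).toNat 1

-- pointwise: A's row equals B's row, for k < n
theorem pv_row_eq (n : Int) (k : Nat) (hk : (k : Int) < n) :
    (List.range n.toNat).map
        (fun j : Nat => if (k : Int) = (j : Int) ∨ (k : Int) = n - 1 - (j : Int) then (1 : Int) else 0)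
      = pvRowB n k := by
  apply List.ext_getElem
  · simp [pvRowB]
  · intro j hj hj'
    simp only [List.getElem_map, List.getElem_range, pvRowB]
    rw [List.getElem_set, List.getElem_set]
    have hjlen : j < n.toNat := by simpa using hj
    have hc : (n - 1 - (k : Int)).toNat = n.toNat - 1 - k := by omega
    simp only [List.getElem_replicate]
    split_ifs <;> omega

theorem pv_fold_B (n : Int) :
    ∀ (t : Nat), (t : Int) ≤ n →
      (PySem.List.pyRange 0 (t : Int) 1).foldl
        (fun ret i =>
          PySem.List.pySetD ret i
            (PySem.List.pySetD (PySem.List.pySetD (PySem.List.pyGetD ret i []) i 1) (n - 1 - i) 1))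
        (List.replicate n.toNat (List.replicate n.toNat (0 : Int)))
      = (List.range n.toNat).map
          (fun k => if k < t then pvRowB n k else List.replicate n.toNat (0 : Int)) := by
  intro t
  induction t with
  | zero =>
    intro _
    rw [show ((0 : Nat) : Int) = 0 from rfl, PySem.List.pyRange_one_eq_nil le_rfl]
    apply List.ext_getElem <;> simp
  | succ t ih =>
    intro ht
    have ht' : (t : Int) ≤ n := by push_cast at ht ⊢; omega
    have htn : t < n.toNat := by omega
    have hsplit : PySem.List.pyRange 0 ((t : Int) + 1) 1
        = PySem.List.pyRange 0 (t : Int) 1 ++ [(t : Int)] := by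
      exact PySem.List.pyRange_one_succ_right (by positivity)
    have hcast : ((t + 1 : Nat) : Int) = (t : Int) + 1 := by push_cast; ring
    rw [hcast, hsplit, List.foldl_append, ih ht']
    simp only [List.foldl_cons, List.foldl_nil]
    have hget : PySem.List.pyGetD
        ((List.range n.toNat).map
          (fun k => if k < t then pvRowB n k else List.replicate n.toNat (0 : Int))) (t : Int) []
        = List.replicate n.toNat (0 : Int) := by
      rw [PySem.List.pyGetD_natCast]
      simp [List.getD, htn]
    rw [hget, PySem.List.pySetD_natCast, PySem.List.pySetD_natCast,
      PySem.List.pySetD_of_nonneg (h := show (0 : Int) ≤ n - 1 - (t : Int) by omega)]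
    apply List.ext_getElem
    · simp
    · intro j hj hj'
      have hjn : j < n.toNat := by simpa using hj
      rw [List.getElem_set]
      simp only [List.getElem_map, List.getElem_range]
      split_ifs <;> (try omega) <;> (subst_vars; rfl)

theorem pv_A_eq (n : Int) :
    tworz_plansze n = (PySem.List.pyRange 0 n 1).map
      (fun i => (PySem.List.pyRange 0 n 1).map
        (fun j => if i = j ∨ i = n - 1 - j then (1 : Int) else 0)) := by
  unfold tworz_plansze
  rw [pv_foldl_append]
  simp only [List.nil_append]
  apply List.map_congr_left
  intro i _
  exact pv_rowA n i

-- ===== VERDICT (by name: the statement is the Claim_ definition above) =====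
theorem tworz_plansze_spec : Claim_equal_tworz_plansze := by
  intro n _
  show tworz_plansze n = tworz_plansze_alt n
  by_cases hn : n ≤ 0
  · unfold tworz_plansze tworz_plansze_alt
    rw [PySem.List.pyRange_one_eq_nil hn]
    simp
  · have hret0 : (PySem.List.pyRange 0 n 1).map (fun _ => PySem.List.pyRepeat [(0 : Int)] n)
        = List.replicate n.toNat (List.replicate n.toNat (0 : Int)) := by
      apply List.ext_getElem
      · simp [PySem.List.length_pyRange_one, PySem.List.pyRepeat_singleton]
      · intro j hj hj'
        simp [PySem.List.pyRepeat_singleton]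
    have hid : ((n.toNat : Nat) : Int) = n := by omega
    have hfold := pv_fold_B n n.toNat (by omega)
    rw [hid] at hfold
    simp only [tworz_plansze_alt]
    rw [hret0, hfold, pv_A_eq, PySem.List.pyRange_one]
    simp only [sub_zero, List.map_map]
    apply List.map_congr_left
    intro k hk
    have hk' := List.mem_range.mp hk
    simp only [Function.comp_def, zero_add]
    rw [pv_row_eq n k (by omega)]
    simp [hk']
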